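-- pv_equiv track=rewrite | github.com/AryanSinghShrinet/ai-penetration | graph/chain_builder.py | _infer_final_impact
-- ===== SOURCE A (Python) =====
-- from typing import List, Dict, Optional, Set, Tuple
--
-- def _infer_final_impact(vuln_sequence: List[str]) -> str:
--     """Infer the final impact of a vulnerability chain."""
--     high_impact = {
--         "rce": "Remote Code Execution",
--         "account_takeover": "Account Takeover",
--         "sqli": "Database Compromise",
--         "ssrf": "Internal Network Access",
--         "file_upload": "Remote Code Execution via File Upload",
--         "auth_bypass": "Authentication Bypass",
--     }
--     for vuln in reversed(vuln_sequence):
--         if vuln in high_impact: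
--             return high_impact[vuln]
--     return "Data Exfiltration / Information Disclosure"
-- ===== SOURCE B (Python) =====
-- def _infer_final_impact(vuln_sequence):
--     """Infer the final impact of a vulnerability chain."""
--     high_impact = {
--         "rce": "Remote Code Execution",
--         "account_takeover": "Account Takeover",
--         "sqli": "Database Compromise",
--         "ssrf": "Internal Network Access",
--         "file_upload": "Remote Code Execution via File Upload",
--         "auth_bypass": "Authentication Bypass",
--     }
--     result = "Data Exfiltration / Information Disclosure"
--     for vuln in vuln_sequence:
--         if vuln in high_impact:
--             result = high_impact[vuln]
--     return result
-- ===== Notes on version B (the rewrite author's own statement) =====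
-- stated objective: alternative
-- what changed: Replaced the reverse traversal with early return by a forward single pass that maintains a running result (last match wins), removing both reversed() and the early-return control flow.
import Mathlib
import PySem

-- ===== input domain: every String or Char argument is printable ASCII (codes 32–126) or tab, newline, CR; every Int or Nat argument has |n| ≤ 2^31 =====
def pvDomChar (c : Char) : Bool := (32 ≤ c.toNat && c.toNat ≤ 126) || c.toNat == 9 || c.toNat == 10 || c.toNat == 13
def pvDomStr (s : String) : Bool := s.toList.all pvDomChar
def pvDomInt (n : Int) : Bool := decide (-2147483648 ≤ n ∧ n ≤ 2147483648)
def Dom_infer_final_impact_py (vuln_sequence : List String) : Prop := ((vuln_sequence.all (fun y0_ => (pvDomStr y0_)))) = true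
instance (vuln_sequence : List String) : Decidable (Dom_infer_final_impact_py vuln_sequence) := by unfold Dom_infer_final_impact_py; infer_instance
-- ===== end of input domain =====

-- B replaces A's reverse scan with early return by a forward pass keeping a running result (last match wins); alternative decomposition, same output.


-- ===== PORT A =====
def pvHighImpact : PySem.Dict String String :=
  (((((PySem.Dict.empty.insert "rce" "Remote Code Execution").insert
      "account_takeover" "Account Takeover").insert
      "sqli" "Database Compromise").insert
      "ssrf" "Internal Network Access").insert
      "file_upload" "Remote Code Execution via File Upload").insert
      "auth_bypass" "Authentication Bypass"

-- A's loop: scan reversed(vuln_sequence), return the first key in high_impact; default if none.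
def pvLoopA : List String → String
  | [] => "Data Exfiltration / Information Disclosure"
  | v :: rest =>
    match pvHighImpact.get? v with
    | some s => s
    | none => pvLoopA rest

def infer_final_impact_py (vuln_sequence : List String) : String :=
  pvLoopA vuln_sequence.reverse

-- ===== PORT B =====
-- B's loop: forward fold with an accumulator, overwritten on every match.
def infer_final_impact_py_alt (vuln_sequence : List String) : String :=
  vuln_sequence.foldl
    (fun acc v =>
      match pvHighImpact.get? v with
      | some s => s
      | none => acc)
    "Data Exfiltration / Information Disclosure"

-- ===== PRECONDITION & SPEC =====
def Spec_infer_final_impact_py (vuln_sequence : List String) (out : String) : Prop := out = infer_final_impact_py_alt vuln_sequence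
instance (vuln_sequence : List String) (out : String) : Decidable (Spec_infer_final_impact_py vuln_sequence out) := by unfold Spec_infer_final_impact_py; infer_instance

-- ===== CLAIM (what is proved, stated in full; the proofs are below) =====
def Claim_equal_infer_final_impact_py : Prop := ∀ (vuln_sequence : List String), Dom_infer_final_impact_py vuln_sequence → Spec_infer_final_impact_py vuln_sequence (infer_final_impact_py vuln_sequence)

-- ===== LEMMAS AND PROOFS =====
-- A's reverse scan with an explicit accumulator: pvLoopA l = pvLoopA2 l default.
def pvLoopA2 : List String → String → String
  | [], acc => acc
  | v :: rest, acc =>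
    match pvHighImpact.get? v with
    | some s => s
    | none => pvLoopA2 rest acc

theorem pvLoopA_eq_A2 (l : List String) :
    pvLoopA l = pvLoopA2 l "Data Exfiltration / Information Disclosure" := by
  induction l with
  | nil => rfl
  | cons v rest ih =>
    simp only [pvLoopA, pvLoopA2, ih]

theorem pvLoopA2_append_singleton (l : List String) (v : String) (acc : String) :
    pvLoopA2 (l ++ [v]) acc =
      pvLoopA2 l (match pvHighImpact.get? v with | some s => s | none => acc) := by
  induction l generalizing acc with
  | nil => rfl
  | cons w rest ih =>
    simp only [List.cons_append, pvLoopA2, ih]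

theorem foldl_eq_A2 (l : List String) (acc : String) :
    l.foldl (fun acc v => match pvHighImpact.get? v with | some s => s | none => acc) acc
      = pvLoopA2 l.reverse acc := by
  induction l generalizing acc with
  | nil => rfl
  | cons v rest ih =>
    simp only [List.foldl_cons, List.reverse_cons, ih, pvLoopA2_append_singleton]

-- ===== VERDICT (by name: the statement is the Claim_ definition above) =====
theorem infer_final_impact_py_spec : Claim_equal_infer_final_impact_py := by
  intro vs _
  show infer_final_impact_py vs = infer_final_impact_py_alt vs
  rw [infer_final_impact_py, infer_final_impact_py_alt, foldl_eq_A2, pvLoopA_eq_A2]
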